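-- pv_equiv track=rewrite | github.com/ShubhamShinde148/darkweb-monitor_1 | breach_timeline.py | _calculate_severity
-- ===== SOURCE A (Python) =====
-- from typing import Dict, List, Optional, Tuple
--
-- def _calculate_severity(data_types: List[str], is_sensitive: bool) -> str:
--     """
--     Calculate breach severity based on exposed data types.
--
--     Args:
--         data_types: List of exposed data types
--         is_sensitive: Whether breach is marked sensitive
--
--     Returns:
--         Severity level string
--     """
--     if is_sensitive:
--         return 'critical'
--
--     critical_types = ['Passwords', 'Credit cards', 'Bank account numbers',
--                       'Social security numbers', 'Financial data']
--     high_types = ['Email addresses', 'Phone numbers', 'Physical addresses',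
--                   'Private messages', 'IP addresses']
--     medium_types = ['Usernames', 'Names', 'Dates of birth', 'Genders']
--
--     data_types_lower = [dt.lower() for dt in data_types]
--
--     for ct in critical_types:
--         if ct.lower() in data_types_lower:
--             return 'critical'
--
--     for ht in high_types:
--         if ht.lower() in data_types_lower:
--             return 'high'
--
--     for mt in medium_types:
--         if mt.lower() in data_types_lower:
--             return 'medium'
--
--     return 'low' if data_types else 'unknown'
-- ===== SOURCE B (Python) =====
-- _RANK = {
--     'passwords': 3, 'credit cards': 3, 'bank account numbers': 3,
--     'social security numbers': 3, 'financial data': 3,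
--     'email addresses': 2, 'phone numbers': 2, 'physical addresses': 2,
--     'private messages': 2, 'ip addresses': 2,
--     'usernames': 1, 'names': 1, 'dates of birth': 1, 'genders': 1,
-- }
-- _NAMES = ('low', 'medium', 'high', 'critical')
--
-- def _calculate_severity(data_types, is_sensitive):
--     if is_sensitive:
--         return 'critical'
--     if not data_types:
--         return 'unknown'
--     best = 0
--     for dt in data_types:
--         best = max(best, _RANK.get(dt.lower(), 0))
--     return _NAMES[best]
-- ===== Notes on version B (the rewrite author's own statement) =====
-- stated objective: simpler
-- what changed: Replaces A's three sequential scans over fixed category lists (each doing a membership test against the lowered input) by one inverted rank dictionary and a single max-rank pass over the input, translating the best rank to a severity name at the end.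
import Mathlib
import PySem

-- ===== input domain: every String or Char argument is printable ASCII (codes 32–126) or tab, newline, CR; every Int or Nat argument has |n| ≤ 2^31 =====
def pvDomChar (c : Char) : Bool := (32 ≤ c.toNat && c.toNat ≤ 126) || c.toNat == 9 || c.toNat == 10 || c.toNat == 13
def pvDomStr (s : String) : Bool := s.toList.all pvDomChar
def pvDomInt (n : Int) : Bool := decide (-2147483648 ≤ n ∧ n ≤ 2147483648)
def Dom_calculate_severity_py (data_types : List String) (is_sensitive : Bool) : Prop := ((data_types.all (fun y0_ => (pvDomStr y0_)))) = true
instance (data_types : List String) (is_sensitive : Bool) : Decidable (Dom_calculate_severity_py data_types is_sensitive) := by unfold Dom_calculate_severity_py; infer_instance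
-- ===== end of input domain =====

-- B replaces A's three fixed category-list scans by one inverted rank dictionary and a
-- single max-rank pass over the input (objective: simpler; same severity for every input).

-- ===== PORT A =====
def pvCriticalTypes : List String := ["Passwords", "Credit cards", "Bank account numbers",
  "Social security numbers", "Financial data"]
def pvHighTypes : List String := ["Email addresses", "Phone numbers", "Physical addresses",
  "Private messages", "IP addresses"]
def pvMediumTypes : List String := ["Usernames", "Names", "Dates of birth", "Genders"]

def calculate_severity_py (data_types : List String) (is_sensitive : Bool) : String :=
  if is_sensitive then "critical"
  else
    let data_types_lower := data_types.map PySem.Str.lower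
    -- each 'for t in <category>: if t.lower() in data_types_lower: return <level>'
    if pvCriticalTypes.any (fun ct => data_types_lower.contains (PySem.Str.lower ct)) then "critical"
    else if pvHighTypes.any (fun ht => data_types_lower.contains (PySem.Str.lower ht)) then "high"
    else if pvMediumTypes.any (fun mt => data_types_lower.contains (PySem.Str.lower mt)) then "medium"
    else if data_types.isEmpty then "unknown" else "low"

-- ===== PORT B =====
def pvRank : PySem.Dict String Nat := PySem.Dict.ofList
  [("passwords", 3), ("credit cards", 3), ("bank account numbers", 3),
   ("social security numbers", 3), ("financial data", 3),
   ("email addresses", 2), ("phone numbers", 2), ("physical addresses", 2),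
   ("private messages", 2), ("ip addresses", 2),
   ("usernames", 1), ("names", 1), ("dates of birth", 1), ("genders", 1)]

def pvNames : List String := ["low", "medium", "high", "critical"]

def calculate_severity_py_alt (data_types : List String) (is_sensitive : Bool) : String :=
  if is_sensitive then "critical"
  else if data_types.isEmpty then "unknown"
  else
    let best := data_types.foldl
      (fun b dt => max b (PySem.Dict.getD pvRank (PySem.Str.lower dt) 0)) 0
    pvNames.getD best ""   -- best is always 0..3, so the default is never used

-- ===== PRECONDITION & SPEC =====
def Spec_calculate_severity_py (data_types : List String) (is_sensitive : Bool) (out : String) : Prop := out = calculate_severity_py_alt data_types is_sensitive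
instance (data_types : List String) (is_sensitive : Bool) (out : String) : Decidable (Spec_calculate_severity_py data_types is_sensitive out) := by unfold Spec_calculate_severity_py; infer_instance

-- ===== CLAIM (what is proved, stated in full; the proofs are below) =====
def Claim_equal_calculate_severity_py : Prop := ∀ (data_types : List String) (is_sensitive : Bool), Dom_calculate_severity_py data_types is_sensitive → Spec_calculate_severity_py data_types is_sensitive (calculate_severity_py data_types is_sensitive)

-- ===== LEMMAS AND PROOFS =====

-- generic getD facts on a literal association list
lemma getD_mk_le (l : List (String × Nat)) (x : String) (m : Nat)
    (h : ∀ p ∈ l, p.2 ≤ m) : (PySem.Dict.mk l).getD x 0 ≤ m := by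
  induction l with
  | nil => simp [PySem.Dict.getD_eq_get?_getD, PySem.Dict.get?]
  | cons p rest ih =>
    rw [PySem.Dict.getD_eq_get?_getD, PySem.Dict.get?_mk_cons]
    split
    · exact h p (by simp)
    · rw [← PySem.Dict.getD_eq_get?_getD]
      exact ih (fun q hq => h q (by simp [hq]))

lemma le_getD_mk_iff (k : Nat) (l : List (String × Nat))
    (hnd : (l.map Prod.fst).Nodup) (x : String) (hk : 1 ≤ k) :
    k ≤ (PySem.Dict.mk l).getD x 0 ↔ ∃ p ∈ l, p.1 = x ∧ k ≤ p.2 := by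
  induction l with
  | nil => simp [PySem.Dict.getD_eq_get?_getD, PySem.Dict.get?]; omega
  | cons p rest ih =>
    obtain ⟨a, b⟩ := p
    simp only [List.map_cons, List.nodup_cons, List.mem_map] at hnd
    rw [PySem.Dict.getD_eq_get?_getD, PySem.Dict.get?_mk_cons]
    by_cases hax : a = x
    · subst hax
      simp only [beq_self_eq_true, if_pos, Option.getD_some]
      constructor
      · intro hkb; exact ⟨(a, b), by simp, rfl, hkb⟩
      · rintro ⟨⟨c, v⟩, hv, rfl, hkv⟩
        rcases List.mem_cons.mp hv with h1 | h1
        · cases h1; exact hkv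
        · exact absurd ⟨(c, v), h1, rfl⟩ hnd.1
    · have hfa : (a == x) = false := by simp [hax]
      rw [hfa]
      simp only [Bool.false_eq_true, if_false, ← PySem.Dict.getD_eq_get?_getD]
      rw [ih hnd.2]
      constructor
      · rintro ⟨q, hq, hq1, hkq⟩; exact ⟨q, List.mem_cons_of_mem _ hq, hq1, hkq⟩
      · rintro ⟨q, hq, hq1, hkq⟩
        rcases List.mem_cons.mp hq with h1 | h1
        · subst h1; exact absurd hq1 hax
        · exact ⟨q, h1, hq1, hkq⟩

lemma pvRank_mk : pvRank = PySem.Dict.mk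
  [("passwords", 3), ("credit cards", 3), ("bank account numbers", 3),
   ("social security numbers", 3), ("financial data", 3),
   ("email addresses", 2), ("phone numbers", 2), ("physical addresses", 2),
   ("private messages", 2), ("ip addresses", 2),
   ("usernames", 1), ("names", 1), ("dates of birth", 1), ("genders", 1)] := by decide

lemma pvRank_le (s : String) : PySem.Dict.getD pvRank s 0 ≤ 3 := by
  rw [pvRank_mk]
  exact getD_mk_le _ _ _ (by decide)

def pvC : List String := ["passwords", "credit cards", "bank account numbers",
  "social security numbers", "financial data"]
def pvH : List String := ["email addresses", "phone numbers", "physical addresses",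
  "private messages", "ip addresses"]
def pvM : List String := ["usernames", "names", "dates of birth", "genders"]

lemma pvRank3 (s : String) : 3 ≤ PySem.Dict.getD pvRank s 0 ↔ s ∈ pvC := by
  rw [pvRank_mk, le_getD_mk_iff 3 _ (by decide) _ (by norm_num)]
  constructor
  · rintro ⟨⟨a, b⟩, hp, rfl, hk⟩
    fin_cases hp <;> simp_all <;> decide
  · intro hs
    simp only [pvC, List.mem_cons, List.not_mem_nil, or_false] at hs
    rcases hs with rfl|rfl|rfl|rfl|rfl <;> decide

lemma pvRank2 (s : String) : 2 ≤ PySem.Dict.getD pvRank s 0 ↔ s ∈ pvC ∨ s ∈ pvH := by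
  rw [pvRank_mk, le_getD_mk_iff 2 _ (by decide) _ (by norm_num)]
  constructor
  · rintro ⟨⟨a, b⟩, hp, rfl, hk⟩
    fin_cases hp <;> simp_all <;> decide
  · intro hs
    simp only [pvC, pvH, List.mem_cons, List.not_mem_nil, or_false] at hs
    rcases hs with (rfl|rfl|rfl|rfl|rfl)|(rfl|rfl|rfl|rfl|rfl) <;> decide

lemma pvRank1 (s : String) :
    1 ≤ PySem.Dict.getD pvRank s 0 ↔ s ∈ pvC ∨ s ∈ pvH ∨ s ∈ pvM := by
  rw [pvRank_mk, le_getD_mk_iff 1 _ (by decide) _ (by norm_num)]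
  constructor
  · rintro ⟨⟨a, b⟩, hp, rfl, hk⟩
    fin_cases hp <;> simp_all <;> decide
  · intro hs
    simp only [pvC, pvH, pvM, List.mem_cons, List.not_mem_nil, or_false] at hs
    rcases hs with (rfl|rfl|rfl|rfl|rfl)|(rfl|rfl|rfl|rfl|rfl)|(rfl|rfl|rfl|rfl) <;> decide

-- A's category scan, rephrased as one pass over the input
lemma any_swap (ts xs : List String) :
    (ts.any fun t => (xs.map PySem.Str.lower).contains (PySem.Str.lower t)) = true ↔
      ∃ x ∈ xs, PySem.Str.lower x ∈ ts.map PySem.Str.lower := by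
  simp only [List.any_eq_true, List.contains_iff_mem, List.mem_map]
  constructor
  · rintro ⟨t, ht, x, hx, he⟩; exact ⟨x, hx, t, ht, he.symm⟩
  · rintro ⟨x, hx, t, ht, he⟩; exact ⟨t, ht, x, hx, he.symm⟩

-- the max-rank fold
lemma le_best_iff (xs : List String) (k a : Nat) :
    k ≤ xs.foldl (fun b dt => max b (PySem.Dict.getD pvRank (PySem.Str.lower dt) 0)) a ↔
      k ≤ a ∨ ∃ dt ∈ xs, k ≤ PySem.Dict.getD pvRank (PySem.Str.lower dt) 0 := by
  induction xs generalizing a with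
  | nil => simp
  | cons x xs ih =>
    simp only [List.foldl_cons, ih, le_max_iff, List.mem_cons]
    constructor
    · rintro ((h|h)|⟨dt, hdt, h⟩)
      · exact Or.inl h
      · exact Or.inr ⟨x, Or.inl rfl, h⟩
      · exact Or.inr ⟨dt, Or.inr hdt, h⟩
    · rintro (h|⟨dt, (rfl|hdt), h⟩)
      · exact Or.inl (Or.inl h)
      · exact Or.inl (Or.inr h)
      · exact Or.inr ⟨dt, hdt, h⟩

lemma best_le (xs : List String) (a : Nat) (ha : a ≤ 3) :
    xs.foldl (fun b dt => max b (PySem.Dict.getD pvRank (PySem.Str.lower dt) 0)) a ≤ 3 := by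
  induction xs generalizing a with
  | nil => simpa
  | cons x xs ih =>
    simp only [List.foldl_cons]
    exact ih _ (max_le ha (pvRank_le _))

-- ===== VERDICT (by name: the statement is the Claim_ definition above) =====
theorem calculate_severity_py_spec : Claim_equal_calculate_severity_py := by
  intro data_types is_sensitive _dom
  unfold Spec_calculate_severity_py calculate_severity_py calculate_severity_py_alt
  cases is_sensitive with
  | true => simp
  | false =>
    simp only [Bool.false_eq_true, if_false]
    have hmapC : pvCriticalTypes.map PySem.Str.lower = pvC := by decide
    have hmapH : pvHighTypes.map PySem.Str.lower = pvH := by decide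
    have hmapM : pvMediumTypes.map PySem.Str.lower = pvM := by decide
    by_cases hemp : data_types = []
    · subst hemp; decide
    · have hne : data_types.isEmpty = false := by
        simpa [List.isEmpty_iff] using hemp
      rw [hne]
      set best := data_types.foldl
        (fun b dt => max b (PySem.Dict.getD pvRank (PySem.Str.lower dt) 0)) 0 with hbest
      have hb3 : 3 ≤ best ↔ ∃ dt ∈ data_types, PySem.Str.lower dt ∈ pvC := by
        rw [hbest, le_best_iff]
        constructor
        · rintro (h | ⟨dt, hdt, h⟩)
          · omega
          · exact ⟨dt, hdt, (pvRank3 _).mp h⟩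
        · rintro ⟨dt, hdt, h⟩
          exact Or.inr ⟨dt, hdt, (pvRank3 _).mpr h⟩
      have hb2 : 2 ≤ best ↔ ∃ dt ∈ data_types,
          PySem.Str.lower dt ∈ pvC ∨ PySem.Str.lower dt ∈ pvH := by
        rw [hbest, le_best_iff]
        constructor
        · rintro (h | ⟨dt, hdt, h⟩)
          · omega
          · exact ⟨dt, hdt, (pvRank2 _).mp h⟩
        · rintro ⟨dt, hdt, h⟩
          exact Or.inr ⟨dt, hdt, (pvRank2 _).mpr h⟩
      have hb1 : 1 ≤ best ↔ ∃ dt ∈ data_types,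
          PySem.Str.lower dt ∈ pvC ∨ PySem.Str.lower dt ∈ pvH ∨ PySem.Str.lower dt ∈ pvM := by
        rw [hbest, le_best_iff]
        constructor
        · rintro (h | ⟨dt, hdt, h⟩)
          · omega
          · exact ⟨dt, hdt, (pvRank1 _).mp h⟩
        · rintro ⟨dt, hdt, h⟩
          exact Or.inr ⟨dt, hdt, (pvRank1 _).mpr h⟩
      have hble : best ≤ 3 := best_le _ _ (by norm_num)
      have hCiff := any_swap pvCriticalTypes data_types
      have hHiff := any_swap pvHighTypes data_types
      have hMiff := any_swap pvMediumTypes data_types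
      rw [hmapC] at hCiff; rw [hmapH] at hHiff; rw [hmapM] at hMiff
      -- case on the value of best
      by_cases h3 : 3 ≤ best
      · have hb : best = 3 := le_antisymm hble h3
        have hC : (pvCriticalTypes.any fun ct =>
            (data_types.map PySem.Str.lower).contains (PySem.Str.lower ct)) = true :=
          hCiff.mpr (hb3.mp h3)
        rw [hC, hb]
        simp [pvNames]
      · have hC : (pvCriticalTypes.any fun ct =>
            (data_types.map PySem.Str.lower).contains (PySem.Str.lower ct)) = false := by
          rw [← Bool.not_eq_true, hCiff]
          exact fun h => h3 (hb3.mpr h)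
        rw [hC]
        by_cases h2 : 2 ≤ best
        · have hb : best = 2 := by omega
          have hH : (pvHighTypes.any fun ht =>
              (data_types.map PySem.Str.lower).contains (PySem.Str.lower ht)) = true := by
            rw [hHiff]
            obtain ⟨dt, hdt, hor⟩ := hb2.mp h2
            rcases hor with hc | hh
            · exact absurd (hb3.mpr ⟨dt, hdt, hc⟩) h3
            · exact ⟨dt, hdt, hh⟩
          rw [hH, hb]
          simp [pvNames]
        · have hH : (pvHighTypes.any fun ht =>
              (data_types.map PySem.Str.lower).contains (PySem.Str.lower ht)) = false := by
            rw [← Bool.not_eq_true, hHiff]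
            rintro ⟨dt, hdt, hh⟩
            exact h2 (hb2.mpr ⟨dt, hdt, Or.inr hh⟩)
          rw [hH]
          by_cases h1 : 1 ≤ best
          · have hb : best = 1 := by omega
            have hM : (pvMediumTypes.any fun mt =>
                (data_types.map PySem.Str.lower).contains (PySem.Str.lower mt)) = true := by
              rw [hMiff]
              obtain ⟨dt, hdt, hor⟩ := hb1.mp h1
              rcases hor with hc | hh | hm
              · exact absurd (hb3.mpr ⟨dt, hdt, hc⟩) h3
              · exact absurd (hb2.mpr ⟨dt, hdt, Or.inr hh⟩) h2
              · exact ⟨dt, hdt, hm⟩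
            rw [hM, hb]
            simp [pvNames]
          · have hb : best = 0 := by omega
            have hM : (pvMediumTypes.any fun mt =>
                (data_types.map PySem.Str.lower).contains (PySem.Str.lower mt)) = false := by
              rw [← Bool.not_eq_true, hMiff]
              rintro ⟨dt, hdt, hm⟩
              exact h1 (hb1.mpr ⟨dt, hdt, Or.inr (Or.inr hm)⟩)
            rw [hM, hb]
            simp [pvNames]
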